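-- pv_equiv track=rewrite | github.com/MrOrdenador/adventjs-2025 | day11/.py | find_unsafe_gifts
-- ===== SOURCE A (Python) =====
-- def find_unsafe_gifts(warehouse: list[str]) -> int:
--   warehouse_board = [line for line in warehouse if line.strip()]
--   rows = len(warehouse_board)
--   cols = len(warehouse_board[0])
--   unprodected_gifts = 0
--
--   for row in range(rows):
--     for col in range(cols):
--       if warehouse_board[row][col] == "*":
--         up = row > 0 and warehouse_board[row-1][col] == "#"
--         down = row < rows - 1 and warehouse_board[row+1][col] == "#"
--         left = col > 0 and warehouse_board[row][col - 1] == "#";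
--         right = col < cols - 1 and warehouse_board[row][col + 1] == "#";
--
--         if not (up or down or left or right):
--           unprodected_gifts += 1
--   return unprodected_gifts
-- ===== SOURCE B (Python) =====
-- def find_unsafe_gifts(warehouse: list[str]) -> int:
--   board = [line for line in warehouse if line.strip()]
--   rows = len(board)
--   cols = len(board[0])
--
--   protected = set()
--   for r in range(rows):
--     for c in range(cols):
--       if board[r][c] == "#":
--         if r > 0:
--           protected.add((r - 1, c))
--         if r < rows - 1:
--           protected.add((r + 1, c))
--         if c > 0:
--           protected.add((r, c - 1))
--         if c < cols - 1:
--           protected.add((r, c + 1))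
--
--   count = 0
--   for r in range(rows):
--     for c in range(cols):
--       if board[r][c] == "*" and (r, c) not in protected:
--         count += 1
--   return count
-- ===== Notes on version B (the rewrite author's own statement) =====
-- stated objective: alternative
-- what changed: Instead of checking the four neighbors of every gift cell, B makes one pass collecting the in-bounds neighbor coordinates of every wall into a 'protected' set, then counts gift cells whose coordinate is not in that set.
import Mathlib
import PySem

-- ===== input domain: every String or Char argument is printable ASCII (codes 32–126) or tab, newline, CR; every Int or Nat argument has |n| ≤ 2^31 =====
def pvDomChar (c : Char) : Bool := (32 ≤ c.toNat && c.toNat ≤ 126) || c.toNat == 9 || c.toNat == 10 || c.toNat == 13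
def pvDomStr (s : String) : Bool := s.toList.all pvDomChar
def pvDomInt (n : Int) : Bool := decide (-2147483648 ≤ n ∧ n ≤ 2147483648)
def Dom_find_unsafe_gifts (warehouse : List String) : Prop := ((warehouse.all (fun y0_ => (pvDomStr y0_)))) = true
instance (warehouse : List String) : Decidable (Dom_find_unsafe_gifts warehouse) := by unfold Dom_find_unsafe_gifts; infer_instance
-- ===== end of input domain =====

-- B replaces the per-gift four-neighbor check by one pass that collects the in-bounds
-- neighbor coordinates of every wall into a 'protected' set, then counts gifts outside it.

-- ===== PORT A =====
-- shared with B: the filtered board ('[line for line in warehouse if line.strip()]', as lists of chars)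
def pvBoard (warehouse : List String) : List (List Char) :=
  (warehouse.map String.toList).filter (fun cs => !(PySem.Chars.strip cs == []))

-- 'board[r][c]' (always accessed in range inside Pre_; the default is never read there)
def pvCell (b : List (List Char)) (r c : Int) : Char :=
  PySem.List.pyGetD (PySem.List.pyGetD b r []) c ' '

def find_unsafe_gifts (warehouse : List String) : Int :=
  let board := pvBoard warehouse
  let rows : Int := board.length
  let cols : Int := (PySem.List.pyGetD board 0 []).length
  (PySem.List.pyRange 0 rows 1).foldl (fun acc row =>
    (PySem.List.pyRange 0 cols 1).foldl (fun acc col =>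
      if pvCell board row col = '*' then
        let up    := decide (0 < row)        && decide (pvCell board (row-1) col = '#')
        let down  := decide (row < rows - 1) && decide (pvCell board (row+1) col = '#')
        let left  := decide (0 < col)        && decide (pvCell board row (col-1) = '#')
        let right := decide (col < cols - 1) && decide (pvCell board row (col+1) = '#')
        if !(up || down || left || right) then acc + 1 else acc
      else acc) acc) 0

-- ===== PORT B =====
-- B's first loop: every in-bounds neighbor coordinate of every wall cell
def pvProtected (b : List (List Char)) (rows cols : Int) : PySem.Set (Int × Int) :=
  (PySem.List.pyRange 0 rows 1).foldl (fun s r =>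
    (PySem.List.pyRange 0 cols 1).foldl (fun s c =>
      if pvCell b r c = '#' then
        let s := if 0 < r then PySem.Set.add s (r - 1, c) else s
        let s := if r < rows - 1 then PySem.Set.add s (r + 1, c) else s
        let s := if 0 < c then PySem.Set.add s (r, c - 1) else s
        if c < cols - 1 then PySem.Set.add s (r, c + 1) else s
      else s) s) PySem.Set.empty

def find_unsafe_gifts_alt (warehouse : List String) : Int :=
  let board := pvBoard warehouse
  let rows : Int := board.length
  let cols : Int := (PySem.List.pyGetD board 0 []).length
  let protectedSet := pvProtected board rows cols
  (PySem.List.pyRange 0 rows 1).foldl (fun acc r =>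
    (PySem.List.pyRange 0 cols 1).foldl (fun acc c =>
      if (pvCell board r c == '*') && !(PySem.Set.contains protectedSet (r, c)) then acc + 1
      else acc) acc) 0

-- ===== PRECONDITION & SPEC =====
-- Pre_ excludes exactly the inputs where the Python raises IndexError: a board with no
-- non-blank line ('board[0]'), or some kept line shorter than the first one ('line[col]').
def Pre_find_unsafe_gifts (warehouse : List String) : Prop :=
  pvBoard warehouse ≠ [] ∧
  ∀ row ∈ pvBoard warehouse, ((pvBoard warehouse).headD []).length ≤ row.length
instance (warehouse : List String) : Decidable (Pre_find_unsafe_gifts warehouse) := by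
  unfold Pre_find_unsafe_gifts; infer_instance

def pvWitness_find_unsafe_gifts : List String := ["*#", " *"]

def Spec_find_unsafe_gifts (warehouse : List String) (out : Int) : Prop := out = find_unsafe_gifts_alt warehouse
instance (warehouse : List String) (out : Int) : Decidable (Spec_find_unsafe_gifts warehouse out) := by unfold Spec_find_unsafe_gifts; infer_instance

-- ===== CLAIM (what is proved, stated in full; the proofs are below) =====
def Claim_equal_find_unsafe_gifts : Prop := ∀ (warehouse : List String), Dom_find_unsafe_gifts warehouse → Pre_find_unsafe_gifts warehouse → Spec_find_unsafe_gifts warehouse (find_unsafe_gifts warehouse)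

-- ===== LEMMAS AND PROOFS =====

-- membership in a fold of conditional set-inserts: p got in iff some element contributed it
theorem pv_mem_foldl {α ι : Type} [BEq α] [LawfulBEq α]
    (C : ι → α → Prop) (g : PySem.Set α → ι → PySem.Set α)
    (hg : ∀ s i p, p ∈ g s i ↔ p ∈ s ∨ C i p) :
    ∀ (l : List ι) (s : PySem.Set α) (p : α),
      p ∈ l.foldl g s ↔ p ∈ s ∨ ∃ i ∈ l, C i p := by
  intro l
  induction l with
  | nil => simp
  | cons i t ih =>
    intro s p
    simp only [List.foldl_cons, ih, hg, List.mem_cons]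
    constructor
    · rintro ((h | h) | ⟨j, hj, hc⟩)
      · exact Or.inl h
      · exact Or.inr ⟨i, Or.inl rfl, h⟩
      · exact Or.inr ⟨j, Or.inr hj, hc⟩
    · rintro (h | ⟨j, rfl | hj, hc⟩)
      · exact Or.inl (Or.inl h)
      · exact Or.inl (Or.inr hc)
      · exact Or.inr ⟨j, hj, hc⟩

-- what one wall cell (r,c) contributes to the protected set
def pvContrib (b : List (List Char)) (rows cols : Int) (r c : Int) (p : Int × Int) : Prop :=
  pvCell b r c = '#' ∧
    ((0 < r ∧ p = (r - 1, c)) ∨ (r < rows - 1 ∧ p = (r + 1, c)) ∨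
     (0 < c ∧ p = (r, c - 1)) ∨ (c < cols - 1 ∧ p = (r, c + 1)))

-- the cell (x,y) has a wall on one of its four in-bounds neighbors
def pvAdj (b : List (List Char)) (rows cols x y : Int) : Prop :=
  (0 < x ∧ pvCell b (x-1) y = '#') ∨ (x < rows - 1 ∧ pvCell b (x+1) y = '#') ∨
  (0 < y ∧ pvCell b x (y-1) = '#') ∨ (y < cols - 1 ∧ pvCell b x (y+1) = '#')

theorem pv_mem_inner (b : List (List Char)) (rows cols : Int) (r : Int)
    (s : PySem.Set (Int × Int)) (p : Int × Int) :
    p ∈ (PySem.List.pyRange 0 cols 1).foldl (fun s c =>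
        if pvCell b r c = '#' then
          let s := if 0 < r then PySem.Set.add s (r - 1, c) else s
          let s := if r < rows - 1 then PySem.Set.add s (r + 1, c) else s
          let s := if 0 < c then PySem.Set.add s (r, c - 1) else s
          if c < cols - 1 then PySem.Set.add s (r, c + 1) else s
        else s) s
      ↔ p ∈ s ∨ ∃ c ∈ PySem.List.pyRange 0 cols 1, pvContrib b rows cols r c p := by
  apply pv_mem_foldl (C := fun c p => pvContrib b rows cols r c p)
  intro s c p
  unfold pvContrib
  by_cases hw : pvCell b r c = '#'
  · by_cases h1 : 0 < r <;> by_cases h2 : r < rows - 1 <;>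
      by_cases h3 : 0 < c <;> by_cases h4 : c < cols - 1 <;>
      simp [hw, h1, h2, h3, h4, PySem.Set.mem_add] <;> tauto
  · simp [hw]

theorem pv_mem_protected (b : List (List Char)) (rows cols x y : Int)
    (hx : 0 ≤ x ∧ x < rows) (hy : 0 ≤ y ∧ y < cols) :
    (x, y) ∈ pvProtected b rows cols ↔ pvAdj b rows cols x y := by
  unfold pvProtected
  rw [pv_mem_foldl (C := fun r p => ∃ c ∈ PySem.List.pyRange 0 cols 1, pvContrib b rows cols r c p)
      _ (fun s r p => pv_mem_inner b rows cols r s p)]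
  simp only [PySem.Set.empty, List.not_mem_nil, false_or, PySem.List.mem_pyRange_one,
    pvContrib, pvAdj, Prod.mk.injEq]
  constructor
  · rintro ⟨r, hr, c, hc, hw, (⟨h, hxr, hyc⟩ | ⟨h, hxr, hyc⟩ | ⟨h, hxr, hyc⟩ | ⟨h, hxr, hyc⟩)⟩
    · exact Or.inr (Or.inl ⟨by omega, by rw [show x + 1 = r by omega, hyc]; exact hw⟩)
    · exact Or.inl ⟨by omega, by rw [show x - 1 = r by omega, hyc]; exact hw⟩
    · exact Or.inr (Or.inr (Or.inr ⟨by omega, by rw [hxr, show y + 1 = c by omega]; exact hw⟩))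
    · exact Or.inr (Or.inr (Or.inl ⟨by omega, by rw [hxr, show y - 1 = c by omega]; exact hw⟩))
  · rintro (⟨h, hw⟩ | ⟨h, hw⟩ | ⟨h, hw⟩ | ⟨h, hw⟩)
    · exact ⟨x - 1, by omega, y, by omega, hw, Or.inr (Or.inl ⟨by omega, by omega, rfl⟩)⟩
    · exact ⟨x + 1, by omega, y, by omega, hw, Or.inl ⟨by omega, by omega, rfl⟩⟩
    · exact ⟨x, by omega, y - 1, by omega, hw, Or.inr (Or.inr (Or.inr ⟨by omega, rfl, by omega⟩))⟩
    · exact ⟨x, by omega, y + 1, by omega, hw, Or.inr (Or.inr (Or.inl ⟨by omega, rfl, by omega⟩))⟩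

-- ===== VERDICT (by name: the statement is the Claim_ definition above) =====
theorem find_unsafe_gifts_spec : Claim_equal_find_unsafe_gifts := by
  intro warehouse _ _
  unfold Spec_find_unsafe_gifts
  simp only [find_unsafe_gifts, find_unsafe_gifts_alt]
  apply PySem.List.foldl_congr_mem
  intro acc row hrow
  apply PySem.List.foldl_congr_mem
  intro acc col hcol
  rw [PySem.List.mem_pyRange_one] at hrow hcol
  by_cases hstar : pvCell (pvBoard warehouse) row col = '*'
  · have hmem := pv_mem_protected (pvBoard warehouse) ((pvBoard warehouse).length : Int)
      ((PySem.List.pyGetD (pvBoard warehouse) 0 []).length : Int) row col hrow hcol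
    unfold pvAdj at hmem
    simp [hstar]
    split_ifs with h1 h2 h2
    · exfalso
      obtain ⟨⟨⟨p1, p2⟩, p3⟩, p4⟩ := h1
      rcases hmem.mp h2 with ⟨hr, hw⟩ | ⟨hr, hw⟩ | ⟨hr, hw⟩ | ⟨hr, hw⟩
      · rcases p1 with hle | hne
        · omega
        · exact hne hw
      · rcases p2 with hle | hne
        · omega
        · exact hne hw
      · rcases p3 with hle | hne
        · omega
        · exact hne hw
      · rcases p4 with hle | hne
        · omega
        · exact hne hw
    · rfl
    · rfl
    · exfalso
      apply h1
      have hN : ∀ P, (P → ((0 < row ∧ pvCell (pvBoard warehouse) (row-1) col = '#') ∨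
          (row < ((pvBoard warehouse).length : Int) - 1 ∧ pvCell (pvBoard warehouse) (row+1) col = '#') ∨
          (0 < col ∧ pvCell (pvBoard warehouse) row (col-1) = '#') ∨
          (col < ((PySem.List.pyGetD (pvBoard warehouse) 0 []).length : Int) - 1 ∧ pvCell (pvBoard warehouse) row (col+1) = '#'))) → ¬ P :=
        fun P hp hP => h2 (hmem.mpr (hp hP))
      refine ⟨⟨⟨?_, ?_⟩, ?_⟩, ?_⟩
      · by_cases hbnd : 0 < row
        · exact Or.inr (hN _ (fun hw => Or.inl ⟨hbnd, hw⟩))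
        · exact Or.inl (by omega)
      · by_cases hbnd : row < ((pvBoard warehouse).length : Int) - 1
        · exact Or.inr (hN _ (fun hw => Or.inr (Or.inl ⟨hbnd, hw⟩)))
        · exact Or.inl (by omega)
      · by_cases hbnd : 0 < col
        · exact Or.inr (hN _ (fun hw => Or.inr (Or.inr (Or.inl ⟨hbnd, hw⟩))))
        · exact Or.inl (by omega)
      · by_cases hbnd : col < ((PySem.List.pyGetD (pvBoard warehouse) 0 []).length : Int) - 1
        · exact Or.inr (hN _ (fun hw => Or.inr (Or.inr (Or.inr ⟨hbnd, hw⟩))))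
        · exact Or.inl (by omega)
  · simp [hstar]
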